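-- pv_equiv track=rewrite | github.com/pypi-data/pypi-mirror-324 | packages/turbodl/turbodl-0.3.3-py3-none-any.whl/turbodl/utils.py | generate_chunk_ranges
-- ===== SOURCE A (Python) =====
-- from math import ceil, log2, sqrt
--
-- def generate_chunk_ranges(size_bytes: int | None, max_connections: int) -> list[tuple[int, int]]:
--     if size_bytes is None:
--         return [(0, 0)]
--
--     chunk_size = ceil(size_bytes / max_connections)
--
--     ranges = []
--     start = 0
--
--     while size_bytes > 0:
--         current_chunk = min(chunk_size, size_bytes)
--         end = start + current_chunk - 1
--         ranges.append((start, end))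
--         start = end + 1
--         size_bytes -= current_chunk
--
--     return ranges
-- ===== SOURCE B (Python) =====
-- def generate_chunk_ranges(size_bytes, max_connections):
--     if size_bytes is None:
--         return [(0, 0)]
--     chunk_size = -(-size_bytes // max_connections)  # exact ceiling division
--     if size_bytes <= 0:
--         return []
--     num = -(-size_bytes // chunk_size)
--     return [(i * chunk_size, min((i + 1) * chunk_size, size_bytes) - 1)
--             for i in range(num)]
-- ===== Notes on version B (the rewrite author's own statement) =====
-- stated objective: simpler
-- what changed: Replaces the stateful while-loop (running start/remaining-bytes accumulator) with a closed form: the chunk count is computed up front and each (start, end) range is derived directly from its index.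
import Mathlib
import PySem

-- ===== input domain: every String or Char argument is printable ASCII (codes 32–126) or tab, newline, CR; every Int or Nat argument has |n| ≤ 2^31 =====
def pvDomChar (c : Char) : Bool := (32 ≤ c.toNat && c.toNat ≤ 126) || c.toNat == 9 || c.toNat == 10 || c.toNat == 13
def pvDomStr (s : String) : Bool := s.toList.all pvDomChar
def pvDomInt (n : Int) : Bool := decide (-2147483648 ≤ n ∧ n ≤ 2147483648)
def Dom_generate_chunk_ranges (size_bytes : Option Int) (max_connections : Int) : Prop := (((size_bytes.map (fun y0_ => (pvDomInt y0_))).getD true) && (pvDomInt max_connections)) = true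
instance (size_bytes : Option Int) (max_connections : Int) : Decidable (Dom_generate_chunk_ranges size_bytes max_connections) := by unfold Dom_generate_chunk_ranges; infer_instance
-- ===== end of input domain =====

-- B replaces A's accumulator while-loop by an index-based closed form (same cost, plainer code).
-- Python's float `ceil(a / b)` is ported as exact ceiling division -((-a) // b); this is exact on Dom (|a|,|b| ≤ 2^31 < 2^26·2^27, far below the 2^53 float threshold).

-- ===== PORT A =====
-- A's while-loop: fuel (s.toNat + 1) only makes the recursion total; inside Pre_ the loop
-- runs at most s.toNat times (chunk_size ≥ 1), so the fuel is never exhausted there.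
def chunkLoopA : Nat → Int → Int → Int → List (Int × Int)
  | 0, _, _, _ => []
  | fuel + 1, chunk_size, size_bytes, start =>
    if 0 < size_bytes then
      let current_chunk := min chunk_size size_bytes
      let e := start + current_chunk - 1
      (start, e) :: chunkLoopA fuel chunk_size (size_bytes - current_chunk) (e + 1)
    else []

def generate_chunk_ranges (size_bytes : Option Int) (max_connections : Int) : List (Int × Int) :=
  match size_bytes with
  | none => [(0, 0)]
  | some s =>
    let chunk_size := -(PySem.Int.floordiv (-s) max_connections)
    chunkLoopA (s.toNat + 1) chunk_size s 0

-- ===== PORT B =====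
def generate_chunk_ranges_alt (size_bytes : Option Int) (max_connections : Int) : List (Int × Int) :=
  match size_bytes with
  | none => [(0, 0)]
  | some s =>
    let chunk_size := -(PySem.Int.floordiv (-s) max_connections)
    if s ≤ 0 then []
    else
      let num := -(PySem.Int.floordiv (-s) chunk_size)
      (PySem.List.pyRange 0 num 1).map
        (fun i => (i * chunk_size, min ((i + 1) * chunk_size) s - 1))

-- ===== PRECONDITION & SPEC =====
-- Pre_ excludes max_connections = 0 (A raises ZeroDivisionError) and the case
-- size_bytes > 0 with max_connections < 0 (A's while-loop never terminates).
def Pre_generate_chunk_ranges (size_bytes : Option Int) (max_connections : Int) : Prop :=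
  size_bytes = none ∨ (max_connections ≠ 0 ∧ (size_bytes.getD 0 ≤ 0 ∨ 0 < max_connections))

instance (size_bytes : Option Int) (max_connections : Int) : Decidable (Pre_generate_chunk_ranges size_bytes max_connections) := by
  unfold Pre_generate_chunk_ranges; infer_instance

def pvWitness_generate_chunk_ranges : Option Int × Int := (some 10, 3)

def Spec_generate_chunk_ranges (size_bytes : Option Int) (max_connections : Int) (out : List (Int × Int)) : Prop := out = generate_chunk_ranges_alt size_bytes max_connections
instance (size_bytes : Option Int) (max_connections : Int) (out : List (Int × Int)) : Decidable (Spec_generate_chunk_ranges size_bytes max_connections out) := by unfold Spec_generate_chunk_ranges; infer_instance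

-- ===== CLAIM (what is proved, stated in full; the proofs are below) =====
def Claim_equal_generate_chunk_ranges : Prop := ∀ (size_bytes : Option Int) (max_connections : Int), Dom_generate_chunk_ranges size_bytes max_connections → Pre_generate_chunk_ranges size_bytes max_connections → Spec_generate_chunk_ranges size_bytes max_connections (generate_chunk_ranges size_bytes max_connections)

-- ===== LEMMAS AND PROOFS =====

-- ceiling division ⌈a/b⌉ = -((-a) // b): its defining bracket, uniqueness, positivity
theorem pvCeil_bounds (a b : Int) (hb : 0 < b) :
    (-(PySem.Int.floordiv (-a) b) - 1) * b < a ∧ a ≤ -(PySem.Int.floordiv (-a) b) * b :=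
  (PySem.Int.neg_floordiv_neg_eq_iff_of_pos hb).mp rfl

theorem pvCeil_eq (a b q : Int) (hb : 0 < b) (h1 : (q - 1) * b < a) (h2 : a ≤ q * b) :
    -(PySem.Int.floordiv (-a) b) = q :=
  (PySem.Int.neg_floordiv_neg_eq_iff_of_pos hb).mpr ⟨h1, h2⟩

theorem pvCeil_pos (a b : Int) (hb : 0 < b) (ha : 0 < a) :
    1 ≤ -(PySem.Int.floordiv (-a) b) := by
  have h := pvCeil_bounds a b hb
  nlinarith [h.1, h.2]

-- Characterisation of A's loop: with chunk_size ≥ 1 and enough fuel, the loop emits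
-- exactly the index-derived ranges, shifted by the running start offset.
theorem chunkLoopA_eq (cs : Int) (hcs : 1 ≤ cs) :
    ∀ (fuel : Nat) (s start : Int), s.toNat < fuel →
      chunkLoopA fuel cs s start =
        (PySem.List.pyRange 0 (-(PySem.Int.floordiv (-s) cs)) 1).map
          (fun i => (start + i * cs, start + min ((i + 1) * cs) s - 1)) := by
  intro fuel
  induction fuel with
  | zero => intro s start h; omega
  | succ n ih =>
    intro s start h
    by_cases hs : 0 < s
    · have hnum := pvCeil_pos s cs (by omega) hs
      simp only [chunkLoopA, if_pos hs]
      rw [PySem.List.pyRange_one_cons (by omega)]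
      rw [ih (s - min cs s) (start + min cs s - 1 + 1) (by omega)]
      by_cases hsc : s ≤ cs
      · -- last chunk: current = s, remaining = 0, num = 1
        have hmin : min cs s = s := min_eq_right hsc
        have hnum1 : -(PySem.Int.floordiv (-s) cs) = 1 :=
          pvCeil_eq s cs 1 (by omega) (by omega) (by omega)
        have h0 : -(PySem.Int.floordiv (-(s - min cs s)) cs) = 0 := by
          rw [hmin, sub_self]
          exact pvCeil_eq 0 cs 0 (by omega) (by omega) (by omega)
        rw [h0, hnum1]
        rw [PySem.List.pyRange_one_eq_nil (by omega), PySem.List.pyRange_one_eq_nil (by omega)]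
        simp only [List.map_nil, List.map_cons, zero_mul, add_zero, zero_add, one_mul, hmin]
      · -- current = cs, remaining = s - cs
        have hmin : min cs s = cs := min_eq_left (by omega)
        have hb := pvCeil_bounds s cs (by omega)
        have hnum' : -(PySem.Int.floordiv (-(s - min cs s)) cs) =
            -(PySem.Int.floordiv (-s) cs) - 1 := by
          rw [hmin]
          refine pvCeil_eq _ _ _ (by omega) ?_ ?_
          · nlinarith [hb.1]
          · nlinarith [hb.2]
        rw [hnum']
        rw [PySem.List.pyRange_one, PySem.List.pyRange_one]
        simp only [List.map_cons, List.map_map, List.cons.injEq]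
        refine ⟨?_, ?_⟩
        · simp [hmin]
        · have hlen : (-PySem.Int.floordiv (-s) cs - 1 - 0).toNat
              = (-PySem.Int.floordiv (-s) cs - (0 + 1)).toNat := by omega
          rw [hlen]
          apply List.map_congr_left
          intro k hk
          simp only [Function.comp_apply, Prod.mk.injEq, hmin]
          refine ⟨by ring, ?_⟩
          simp only [min_def]
          split_ifs with h1 h2 <;> ring_nf <;> ring_nf at * <;> linarith
    · simp only [chunkLoopA, if_neg hs]
      have h0 : -(PySem.Int.floordiv (-s) cs) ≤ 0 := by
        by_contra hpos
        have hb := pvCeil_bounds s cs (by omega)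
        nlinarith [hb.1]
      rw [PySem.List.pyRange_one_eq_nil (by omega)]
      simp

-- ===== VERDICT (by name: the statement is the Claim_ definition above) =====
theorem generate_chunk_ranges_spec : Claim_equal_generate_chunk_ranges := by
  intro sb mc hdom hpre
  unfold Spec_generate_chunk_ranges
  match sb with
  | none => rfl
  | some s =>
    rcases hpre with h | ⟨hmc, hcase⟩
    · exact absurd h (by simp)
    · simp only [Option.getD] at hcase
      simp only [generate_chunk_ranges, generate_chunk_ranges_alt]
      by_cases hs : s ≤ 0
      · rw [if_pos hs]
        have h1 : s.toNat + 1 = 1 := by omega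
        rw [h1]
        simp [chunkLoopA, not_lt.mpr hs]
      · rw [if_neg hs]
        have hmcpos : 0 < mc := by
          rcases hcase with h | h
          · omega
          · exact h
        have hcs : 1 ≤ -(PySem.Int.floordiv (-s) mc) := pvCeil_pos s mc hmcpos (by omega)
        rw [chunkLoopA_eq _ hcs _ _ _ (by omega)]
        simp
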